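-- pv_equiv track=rewrite | github.com/august-hw2/24_Programmers_Python | 프로그래머스/1/76501. 음양 더하기/음양 더하기.py | solution
-- ===== SOURCE A (Python) =====
-- def solution(absolutes, signs):
--     ans = 0
--
--     for i, j in enumerate(absolutes):
--         if signs[i] == True:
--             ans += j
--         else:
--             ans -= j
--
--     return ans
-- ===== SOURCE B (Python) =====
-- def solution(absolutes, signs):
--     total = sum(absolutes)
--     neg = sum(absolutes[i] for i in range(len(absolutes)) if not (signs[i] == True))
--     return total - 2 * neg
-- ===== Notes on version B (the rewrite author's own statement) =====
-- stated objective: alternative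
-- what changed: Replaces the single add/subtract accumulator loop by a 'total minus twice the negative part' reformulation: one sum of all absolutes plus one index-driven filtered sum of the negatively-signed ones.
import Mathlib
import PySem

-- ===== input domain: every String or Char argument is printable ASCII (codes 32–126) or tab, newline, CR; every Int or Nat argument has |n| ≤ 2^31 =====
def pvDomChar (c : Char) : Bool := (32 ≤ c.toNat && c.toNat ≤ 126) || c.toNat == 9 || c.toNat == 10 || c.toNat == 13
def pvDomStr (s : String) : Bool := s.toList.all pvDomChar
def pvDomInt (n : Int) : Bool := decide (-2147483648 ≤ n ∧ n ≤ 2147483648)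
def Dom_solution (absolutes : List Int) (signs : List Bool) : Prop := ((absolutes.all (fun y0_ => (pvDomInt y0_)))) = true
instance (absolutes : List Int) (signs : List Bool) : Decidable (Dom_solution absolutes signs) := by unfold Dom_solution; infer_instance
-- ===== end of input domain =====

-- B reformulates the signed sum as total minus twice the negatively-signed part (alternative decomposition, same cost).

-- ===== PORT A =====
-- for i, j in enumerate(absolutes): if signs[i] == True: ans += j else: ans -= j
def solution (absolutes : List Int) (signs : List Bool) : Int :=
  (PySem.List.enumerate absolutes 0).foldl
    (fun ans ij =>
      if PySem.List.pyGetD signs ij.1 false = true then ans + ij.2 else ans - ij.2) 0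

-- ===== PORT B =====
-- total = sum(absolutes); neg = sum(absolutes[i] for i in range(len(absolutes)) if not (signs[i] == True))
def solution_alt (absolutes : List Int) (signs : List Bool) : Int :=
  let total := absolutes.sum
  let neg :=
    (((PySem.List.pyRange 0 (absolutes.length : Int) 1).filter
        (fun i => !(PySem.List.pyGetD signs i false == true))).map
      (fun i => PySem.List.pyGetD absolutes i 0)).sum
  total - 2 * neg

-- ===== PRECONDITION & SPEC =====
-- Pre_ excludes exactly the inputs where Python A raises IndexError (signs shorter than absolutes).
def Pre_solution (absolutes : List Int) (signs : List Bool) : Prop :=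
  absolutes.length ≤ signs.length
instance (absolutes : List Int) (signs : List Bool) : Decidable (Pre_solution absolutes signs) := by
  unfold Pre_solution; infer_instance

def pvWitness_solution : List Int × List Bool := ([4, 7, 12], [true, false, true])

def Spec_solution (absolutes : List Int) (signs : List Bool) (out : Int) : Prop := out = solution_alt absolutes signs
instance (absolutes : List Int) (signs : List Bool) (out : Int) : Decidable (Spec_solution absolutes signs out) := by unfold Spec_solution; infer_instance

-- ===== CLAIM (what is proved, stated in full; the proofs are below) =====
def Claim_equal_solution : Prop := ∀ (absolutes : List Int) (signs : List Bool), Dom_solution absolutes signs → Pre_solution absolutes signs → Spec_solution absolutes signs (solution absolutes signs)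

-- ===== LEMMAS AND PROOFS =====

-- signed sum of the zipped lists
def gsum : List Int → List Bool → Int
  | [], _ => 0
  | _, [] => 0
  | a :: as, s :: ss => (if s then a else -a) + gsum as ss

-- sum of the negatively-signed elements
def nsum : List Int → List Bool → Int
  | [], _ => 0
  | _, [] => 0
  | a :: as, s :: ss => (if s then 0 else a) + nsum as ss

theorem pyGetD_append_len {α : Type} (pre : List α) (y : α) (ys : List α) (d : α) :
    PySem.List.pyGetD (pre ++ y :: ys) (pre.length : Int) d = y := by
  rw [PySem.List.pyGetD_natCast]
  simp [List.getD, List.getElem?_append_right]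

theorem getD_append_len {α : Type} (pre : List α) (y : α) (ys : List α) (d : α) :
    (pre ++ y :: ys)[pre.length]?.getD d = y := by
  simp [List.getElem?_append_right]

theorem la (as : List Int) (pre ss : List Bool) (h : as.length ≤ ss.length) :
    ((PySem.List.enumerate as (pre.length : Int)).map
      (fun ij => if PySem.List.pyGetD (pre ++ ss) ij.1 false = true then ij.2 else -ij.2)).sum
      = gsum as ss := by
  induction as generalizing pre ss with
  | nil => simp [PySem.List.enumerate_nil, gsum]
  | cons a as ih =>
    cases ss with
    | nil => simp at h
    | cons s ss =>
      rw [PySem.List.enumerate_cons]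
      simp only [List.map_cons, List.sum_cons]
      rw [pyGetD_append_len]
      have h1 : (pre.length : Int) + 1 = ((pre ++ [s]).length : Int) := by push_cast; simp
      have h2 : pre ++ s :: ss = (pre ++ [s]) ++ ss := by simp
      rw [h1, h2, ih (pre ++ [s]) ss (by simpa using h)]
      simp [gsum]

theorem lb (as : List Int) (ss : List Bool) (preA : List Int) (pre : List Bool)
    (hl : pre.length = preA.length) (h : as.length ≤ ss.length) :
    (((PySem.List.pyRange (preA.length : Int) ((preA.length : Int) + as.length) 1).filter
        (fun i => !(PySem.List.pyGetD (pre ++ ss) i false == true))).map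
      (fun i => PySem.List.pyGetD (preA ++ as) i 0)).sum
      = nsum as ss := by
  induction as generalizing ss preA pre with
  | nil =>
    rw [PySem.List.pyRange_one_eq_nil (by simp)]
    simp [nsum]
  | cons a as ih =>
    cases ss with
    | nil => simp at h
    | cons s ss =>
      rw [PySem.List.pyRange_one_cons (by simp)]
      have hpre : (pre ++ s :: ss)[preA.length]?.getD false = s := by
        rw [← hl]; exact getD_append_len pre s ss false
      have h1 : (preA.length : Int) + 1 = ((preA ++ [a]).length : Int) := by push_cast; simp
      have h2 : (preA.length : Int) + ((a :: as).length : Int)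
          = ((preA ++ [a]).length : Int) + (as.length : Int) := by push_cast; simp; omega
      have h3 : preA ++ a :: as = (preA ++ [a]) ++ as := by simp
      have h4 : pre ++ s :: ss = (pre ++ [s]) ++ ss := by simp
      have htail := ih ss (preA ++ [a]) (pre ++ [s]) (by simp [hl]) (by simpa using h)
      cases s with
      | true =>
        rw [List.filter_cons_of_neg (by simp [hpre])]
        rw [h1, h2, h3, h4]
        rw [htail]
        simp [nsum]
      | false =>
        rw [List.filter_cons_of_pos (by simp [hpre])]
        simp only [List.map_cons, List.sum_cons]
        rw [h1, h2, h3, h4]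
        rw [htail, ← h3, pyGetD_append_len preA a as 0]
        simp [nsum]

theorem lc (as : List Int) (ss : List Bool) (h : as.length ≤ ss.length) :
    gsum as ss = as.sum - 2 * nsum as ss := by
  induction as generalizing ss with
  | nil => simp [gsum, nsum]
  | cons a as ih =>
    cases ss with
    | nil => simp at h
    | cons s ss =>
      simp only [gsum, nsum, List.sum_cons]
      rw [ih ss (by simpa using h)]
      cases s <;> simp <;> ring

-- ===== VERDICT (by name: the statement is the Claim_ definition above) =====
theorem solution_spec : Claim_equal_solution := by
  intro absolutes signs _ hpre
  unfold Spec_solution solution solution_alt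
  have hstep : (fun (ans : Int) (ij : Int × Int) =>
      if PySem.List.pyGetD signs ij.1 false = true then ans + ij.2 else ans - ij.2)
      = fun ans ij => ans + (if PySem.List.pyGetD signs ij.1 false = true then ij.2 else -ij.2) := by
    funext ans ij; split <;> ring
  rw [hstep, PySem.List.foldl_add]
  have hA := la absolutes ([] : List Bool) signs hpre
  simp only [List.length_nil, Nat.cast_zero, List.nil_append] at hA
  have hB := lb absolutes signs ([] : List Int) ([] : List Bool) rfl hpre
  simp only [List.length_nil, Nat.cast_zero, List.nil_append, zero_add] at hB
  have hA' : ((PySem.List.enumerate absolutes).map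
      (fun ij => if PySem.List.pyGetD signs ij.1 false = true then ij.2 else -ij.2)).sum
      = gsum absolutes signs := hA
  simp only [hA', hB, zero_add]
  exact lc absolutes signs hpre
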